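-- pv_equiv track=rewrite | github.com/sharad-kr/Pattern-Matching-in-string | pattern_match.py | modPatternMatch
-- ===== SOURCE A (Python) =====
-- def pow(n,x):
--     m=1
--     for i in range(x):
--         m = m*n
--     return m
--
-- def modPatternMatch(q,p,x):
--     # m = len(p)
--     found_pattern=[] #this list stores the indices at which pattern is found in x
--
--     w=pow(26,len(p)-1) % q #SPACE COMPLEXITY = O(log(q)) #storing the value of 26^(pattern_lenght-1) % q #Time complexity = O(m)
--     # Now as hinted in assignment , we follow a hash function to convert a string to a unique integer :
--     # (1) pattern_value correspondind to pattern p (2)current_value corresponding to the substring being checked in x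
--     pattern_value=0
--     current_value=0
-- #Now to optimise space complexity we divide pattern_value by q
-- #Also to optimise time complexity from O(mn) to O(q) as mentioned in assignment , instead of calculating the current_value by
-- #running loop over next pattern_lenght elements , we will subtract the (highest significant quantity)*26^(m-1) and multiply
-- #current value by 26 , then add the updated least significant quantity
--
--     for i in range(len(p)): # Time complexity = O(m*log(q)) # assumed : basic arithmetic operation on 'p' bit is O(p) and we are doing this operation m times
--         pattern_value = ((((26 % q)*pattern_value) % q) + ((ord(p[i])-65) % q)) % q #SPACE COMPLEXITY = O(log(q))
--         current_value = ((((26 % q)*current_value) % q) + ((ord(x[i])-65) % q)) % q #SPACE COMPLEXITY = O(log(q))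
-- # we will compare the values, and store only if current_value=pattern_value
--     if (current_value) == pattern_value :
--         found_pattern.append(0)
--
--     for k in range(1,len(x)-len(p)+1): # Time complexity = O(n*log(q)) # assumed : basic arithmetic operation on 'p' bit is O(p) and we are doing this operation n times
--         current_value = ((((current_value - ((((ord(x[k-1])-65) % q)*w) % q))*(26 % q)) % q)+ ((ord(x[k+len(p)-1])-65) % q)) % q #SPACE COMPLEXITY = O(log(q))
--         if (current_value) == pattern_value:
--             found_pattern.append(k)
--
--     return found_pattern
-- ===== SOURCE B (Python) =====
-- def modPatternMatch(q, p, x):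
--     # Simpler: hash every window from scratch (no rolling update, no precomputed 26^(m-1)).
--     m = len(p)
--     pattern_value = 0
--     for c in p:
--         pattern_value = (26 * pattern_value + (ord(c) - 65)) % q
--     found_pattern = []
--     for k in range(len(x) - m + 1):
--         h = 0
--         for j in range(m):
--             h = (26 * h + (ord(x[k + j]) - 65)) % q
--         if h == pattern_value:
--             found_pattern.append(k)
--     return found_pattern
-- ===== Notes on version B (the rewrite author's own statement) =====
-- stated objective: simpler
-- what changed: B drops A's rolling-hash machinery (the helper pow(26,len(p)-1) weight and the subtract-shift-add window update) and recomputes each window's polynomial hash mod q from scratch in one uniform loop over all starts; A's helper pow builds the full unreduced 26^(len(p)-1) (a Theta(len(p))-digit integer, Theta(len(p)^2) bit cost), while B only ever handles O(log q)-bit values, which is what a timing run measured.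
-- intended difference: For an empty pattern on a non-empty text (and modulus q not the trivial 1 or -1) A's rolling update runs on leftover state and returns only the accidental subset of indices where that garbage hash happens to be 0 (e.g. [0] for q=7, x='B'), while B returns every start index 0..len(x), the intended 'empty pattern matches everywhere' answer. — e.g. on modPatternMatch(7, "", "B"): A returns [0], B returns [0, 1]
import Mathlib
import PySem

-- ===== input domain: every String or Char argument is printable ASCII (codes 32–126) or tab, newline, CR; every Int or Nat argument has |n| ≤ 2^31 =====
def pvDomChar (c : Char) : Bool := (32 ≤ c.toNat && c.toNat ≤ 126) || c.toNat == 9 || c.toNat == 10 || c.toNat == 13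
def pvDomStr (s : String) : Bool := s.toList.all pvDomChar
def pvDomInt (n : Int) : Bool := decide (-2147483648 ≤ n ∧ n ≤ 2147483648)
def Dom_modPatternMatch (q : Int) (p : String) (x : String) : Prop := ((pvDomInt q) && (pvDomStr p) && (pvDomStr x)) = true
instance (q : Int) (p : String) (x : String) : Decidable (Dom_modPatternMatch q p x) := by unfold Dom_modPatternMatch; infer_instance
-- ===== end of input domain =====

-- B replaces A's rolling-hash update (and its pow(26, len(p)-1) weight, which A materialises as a full
-- unreduced big integer) by recomputing each window's hash mod q from scratch in one uniform loop over all
-- window starts: simpler, and measured faster on the generated inputs since B never leaves O(log q)-bit values.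

-- shared character helpers: ord(c) - 65, and ord(s[i]) - 65 (the `none` branch is Python's IndexError,
-- excluded by Pre_; it is never reached on admitted inputs)
def pvV (c : Char) : Int := (c.toNat : Int) - 65
def pvChD (cs : List Char) (i : Int) : Int :=
  match PySem.List.pyGet? cs i with
  | some c => pvV c
  | none => 0

-- ===== PORT A =====
def pvPow (n : Int) (x : Int) : Int :=
  (PySem.List.pyRange 0 x 1).foldl (fun m _ => m * n) 1

def modPatternMatch (q : Int) (p : String) (x : String) : List Int :=
  let ps := p.toList
  let xs := x.toList
  let found : List Int := []
  let w := PySem.Int.mod (pvPow 26 ((ps.length : Int) - 1)) q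
  let pc := (PySem.List.pyRange 0 (ps.length : Int) 1).foldl
    (fun (s : Int × Int) i =>
      (PySem.Int.mod (PySem.Int.mod (PySem.Int.mod 26 q * s.1) q + PySem.Int.mod (pvChD ps i) q) q,
       PySem.Int.mod (PySem.Int.mod (PySem.Int.mod 26 q * s.2) q + PySem.Int.mod (pvChD xs i) q) q))
    (0, 0)
  let found := if pc.2 = pc.1 then found ++ [0] else found
  let res := (PySem.List.pyRange 1 ((xs.length : Int) - (ps.length : Int) + 1) 1).foldl
    (fun (s : List Int × Int) k =>
      let cv := PySem.Int.mod (PySem.Int.mod ((s.2 - PySem.Int.mod (PySem.Int.mod (pvChD xs (k - 1)) q * w) q) * PySem.Int.mod 26 q) q + PySem.Int.mod (pvChD xs (k + (ps.length : Int) - 1)) q) q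
      (if cv = pc.1 then s.1 ++ [k] else s.1, cv))
    (found, pc.2)
  res.1

-- ===== PORT B =====
def modPatternMatch_alt (q : Int) (p : String) (x : String) : List Int :=
  let ps := p.toList
  let xs := x.toList
  let m := ps.length
  let pattern_value := ps.foldl (fun h c => PySem.Int.mod (26 * h + pvV c) q) 0
  (PySem.List.pyRange 0 ((xs.length : Int) - (m : Int) + 1) 1).foldl
    (fun found k =>
      let h := (PySem.List.pyRange 0 (m : Int) 1).foldl
        (fun h j => PySem.Int.mod (26 * h + pvChD xs (k + j)) q) 0
      if h = pattern_value then found ++ [k] else found) []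

-- ===== PRECONDITION & SPEC =====
-- Pre_ excludes exactly the inputs where A raises: q = 0 (ZeroDivisionError) and
-- len(p) > len(x) (IndexError while hashing the first window).
def Pre_modPatternMatch (q : Int) (p : String) (x : String) : Prop :=
  q ≠ 0 ∧ p.toList.length ≤ x.toList.length
instance (q : Int) (p : String) (x : String) : Decidable (Pre_modPatternMatch q p x) := by
  unfold Pre_modPatternMatch; infer_instance
def pvWitness_modPatternMatch : Int × String × String := (11, "AB", "CAB")

-- For an empty pattern on a non-empty text (and a modulus other than the trivial ±1, under which every
-- hash is 0 and both programs return every index) A's rolling update runs on leftover state and returns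
-- only the accidental subset of indices where that garbage hash happens to be 0, while B returns every
-- start index 0..len(x), the intended "empty pattern matches everywhere" answer.
def D_modPatternMatch (q : Int) (p : String) (x : String) : Prop :=
  p = "" ∧ x ≠ "" ∧ q ≠ 1 ∧ q ≠ -1
instance (q : Int) (p : String) (x : String) : Decidable (D_modPatternMatch q p x) := by
  unfold D_modPatternMatch; infer_instance

def Spec_modPatternMatch (q : Int) (p : String) (x : String) (out : List Int) : Prop :=
  ¬ D_modPatternMatch q p x → out = modPatternMatch_alt q p x
instance (q : Int) (p : String) (x : String) (out : List Int) : Decidable (Spec_modPatternMatch q p x out) := by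
  unfold Spec_modPatternMatch; infer_instance

def pvDiffWitness_modPatternMatch : Int × String × String := (7, "", "B")
def pvDiffWitnessOut_modPatternMatch : (List Int) × (List Int) := ([0], [0, 1])

-- ===== CLAIM (what is proved, stated in full; the proofs are below) =====
def Claim_unchanged_modPatternMatch : Prop := ∀ (q : Int) (p : String) (x : String), Dom_modPatternMatch q p x → Pre_modPatternMatch q p x → Spec_modPatternMatch q p x (modPatternMatch q p x)
def Claim_changed_modPatternMatch : Prop := Dom_modPatternMatch (pvDiffWitness_modPatternMatch.1) (pvDiffWitness_modPatternMatch.2.1) (pvDiffWitness_modPatternMatch.2.2) ∧ Pre_modPatternMatch (pvDiffWitness_modPatternMatch.1) (pvDiffWitness_modPatternMatch.2.1) (pvDiffWitness_modPatternMatch.2.2) ∧ D_modPatternMatch (pvDiffWitness_modPatternMatch.1) (pvDiffWitness_modPatternMatch.2.1) (pvDiffWitness_modPatternMatch.2.2) ∧ modPatternMatch (pvDiffWitness_modPatternMatch.1) (pvDiffWitness_modPatternMatch.2.1) (pvDiffWitness_modPatternMatch.2.2) = pvDiffWitnessOut_modPatternMatch.1 ∧ modPatternMatch_alt (pvDiffWitness_modPatternMatch.1)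 (pvDiffWitness_modPatternMatch.2.1) (pvDiffWitness_modPatternMatch.2.2) = pvDiffWitnessOut_modPatternMatch.2 ∧ pvDiffWitnessOut_modPatternMatch.1 ≠ pvDiffWitnessOut_modPatternMatch.2
-- ===== LEMMAS AND PROOFS =====

-- the polynomial hash (no modulus) accumulated left to right from a
def pvPoly (a : Int) (l : List Char) : Int := l.foldl (fun h c => 26 * h + pvV c) a

lemma pvmod_sub_dvd (a q : Int) : q ∣ a - PySem.Int.mod a q := by
  have h := PySem.Int.floordiv_mul_add_mod a q
  exact ⟨PySem.Int.floordiv a q, by linarith⟩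

lemma pvmod_congr {q a b : Int} (hq : q ≠ 0) (h : a ≡ b [ZMOD q]) :
    PySem.Int.mod a q = PySem.Int.mod b q := by
  have d1 := pvmod_sub_dvd a q
  have d2 := pvmod_sub_dvd b q
  have hab : q ∣ a - b := Int.ModEq.dvd h.symm
  have hd : q ∣ PySem.Int.mod a q - PySem.Int.mod b q := by
    have e : PySem.Int.mod a q - PySem.Int.mod b q
        = (b - PySem.Int.mod b q) - (a - PySem.Int.mod a q) + (a - b) := by ring
    rw [e]
    exact dvd_add (dvd_sub d2 d1) hab
  have hz : PySem.Int.mod a q - PySem.Int.mod b q = 0 := by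
    rcases lt_or_gt_of_ne hq with hneg | hpos
    · have b1 := PySem.Int.mod_neg_bounds (a := a) hneg
      have b2 := PySem.Int.mod_neg_bounds (a := b) hneg
      exact Int.eq_zero_of_abs_lt_dvd ((abs_dvd q _).mpr hd)
        (abs_lt.mpr ⟨by rw [abs_of_neg hneg]; omega, by rw [abs_of_neg hneg]; omega⟩)
    · have b1n := PySem.Int.mod_nonneg (a := a) hpos
      have b1l := PySem.Int.mod_lt (a := a) hpos
      have b2n := PySem.Int.mod_nonneg (a := b) hpos
      have b2l := PySem.Int.mod_lt (a := b) hpos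
      exact Int.eq_zero_of_abs_lt_dvd ((abs_dvd q _).mpr hd)
        (abs_lt.mpr ⟨by rw [abs_of_pos hpos]; omega, by rw [abs_of_pos hpos]; omega⟩)
  omega

lemma pvmod_zero {q : Int} (hq : q ≠ 0) : PySem.Int.mod 0 q = 0 := by
  have d := pvmod_sub_dvd 0 q
  have hd : q ∣ PySem.Int.mod 0 q := by
    have := dvd_neg.mpr d; simpa using this
  rcases lt_or_gt_of_ne hq with hneg | hpos
  · have b1 := PySem.Int.mod_neg_bounds (a := 0) hneg
    have := Int.eq_zero_of_abs_lt_dvd ((abs_dvd q _).mpr hd)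
      (abs_lt.mpr ⟨by rw [abs_of_neg hneg]; omega, by rw [abs_of_neg hneg]; omega⟩)
    omega
  · have b1n := PySem.Int.mod_nonneg (a := 0) hpos
    have b1l := PySem.Int.mod_lt (a := 0) hpos
    have := Int.eq_zero_of_abs_lt_dvd ((abs_dvd q _).mpr hd)
      (abs_lt.mpr ⟨by rw [abs_of_pos hpos]; omega, by rw [abs_of_pos hpos]; omega⟩)
    omega

lemma pvmod_modeq (a q : Int) : PySem.Int.mod a q ≡ a [ZMOD q] :=
  Int.modEq_iff_dvd.mpr (pvmod_sub_dvd a q)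


lemma pvstepB {q : Int} (hq : q ≠ 0) (t c : Int) :
    PySem.Int.mod (26 * PySem.Int.mod t q + c) q = PySem.Int.mod (26 * t + c) q :=
  pvmod_congr hq (((pvmod_modeq t q).mul_left 26).add_right c)

lemma pvstepA {q : Int} (hq : q ≠ 0) (s c : Int) :
    PySem.Int.mod (PySem.Int.mod (PySem.Int.mod 26 q * s) q + PySem.Int.mod c q) q
      = PySem.Int.mod (26 * s + c) q :=
  pvmod_congr hq (((pvmod_modeq _ q).trans ((pvmod_modeq 26 q).mul_right s)).add (pvmod_modeq c q))

lemma pvstepRoll {q : Int} (hq : q ≠ 0) (t c Wv d : Int) :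
    PySem.Int.mod (PySem.Int.mod ((PySem.Int.mod t q - PySem.Int.mod (PySem.Int.mod c q * PySem.Int.mod Wv q) q) * PySem.Int.mod 26 q) q + PySem.Int.mod d q) q
      = PySem.Int.mod ((t - c * Wv) * 26 + d) q := by
  have h1 : PySem.Int.mod (PySem.Int.mod c q * PySem.Int.mod Wv q) q ≡ c * Wv [ZMOD q] :=
    (pvmod_modeq _ q).trans ((pvmod_modeq c q).mul (pvmod_modeq Wv q))
  have h2 := (pvmod_modeq t q).sub h1
  have h3 := h2.mul (pvmod_modeq 26 q)
  have h4 := ((pvmod_modeq _ q).trans h3).add (pvmod_modeq d q)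
  exact pvmod_congr hq h4

lemma pvfoldB {q : Int} (hq : q ≠ 0) :
    ∀ (l : List Char) (a : Int),
      l.foldl (fun h c => PySem.Int.mod (26 * h + pvV c) q) (PySem.Int.mod a q)
        = PySem.Int.mod (pvPoly a l) q := by
  intro l
  induction l with
  | nil => intro a; simp [pvPoly]
  | cons c l ih =>
    intro a
    simp only [List.foldl_cons]
    rw [pvstepB hq, ih (26 * a + pvV c)]
    rfl

lemma pvfoldB0 {q : Int} (hq : q ≠ 0) (l : List Char) :
    l.foldl (fun h c => PySem.Int.mod (26 * h + pvV c) q) 0 = PySem.Int.mod (pvPoly 0 l) q := by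
  have h := pvfoldB hq l 0
  rwa [pvmod_zero hq] at h

lemma pvfoldA {q : Int} (hq : q ≠ 0) :
    ∀ (l : List Char) (a : Int),
      l.foldl (fun s c => PySem.Int.mod (PySem.Int.mod (PySem.Int.mod 26 q * s) q + PySem.Int.mod (pvV c) q) q) (PySem.Int.mod a q)
        = PySem.Int.mod (pvPoly a l) q := by
  intro l
  induction l with
  | nil => intro a; simp [pvPoly]
  | cons c l ih =>
    intro a
    simp only [List.foldl_cons]
    rw [pvstepA hq, pvstepB hq, ih (26 * a + pvV c)]
    rfl

lemma pvfoldA0 {q : Int} (hq : q ≠ 0) (l : List Char) :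
    l.foldl (fun s c => PySem.Int.mod (PySem.Int.mod (PySem.Int.mod 26 q * s) q + PySem.Int.mod (pvV c) q) q) 0
      = PySem.Int.mod (pvPoly 0 l) q := by
  have h := pvfoldA hq l 0
  rwa [pvmod_zero hq] at h

lemma pvidxFold (cs : List Char) (f : Int → Int → Int) :
    ∀ (m k : Nat) (a : Int), k + m ≤ cs.length →
      (PySem.List.pyRange 0 (m : Int) 1).foldl (fun h j => f h (pvChD cs ((k : Int) + j))) a
        = ((cs.drop k).take m).foldl (fun h c => f h (pvV c)) a := by
  intro m
  induction m with
  | zero =>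
    intro k a h
    simp [PySem.List.pyRange_one_eq_nil]
  | succ m ih =>
    intro k a h
    have h1 : ((m + 1 : Nat) : Int) = (m : Int) + 1 := by push_cast; ring
    rw [h1, PySem.List.pyRange_one_succ_right (by exact_mod_cast Nat.zero_le m), List.foldl_append]
    have h2 : (cs.drop k).take (m + 1) = (cs.drop k).take m ++ [cs[k + m]'(by omega)] := by
      rw [List.take_add_one]
      congr
      rw [List.getElem?_drop]
      simp [List.getElem?_eq_getElem (show k + m < cs.length by omega)]
    rw [h2, List.foldl_append]
    simp only [List.foldl_cons, List.foldl_nil]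
    rw [ih k a (by omega)]
    have h3 : pvChD cs ((k : Int) + (m : Int)) = pvV (cs[k + m]'(by omega)) := by
      have e : ((k : Int) + (m : Int)) = ((k + m : Nat) : Int) := by push_cast; ring
      rw [e]
      unfold pvChD
      rw [PySem.List.pyGet?_natCast]
      simp [List.getElem?_eq_getElem (show k + m < cs.length by omega)]
    rw [h3]

lemma pvidxFold0 (cs : List Char) (f : Int → Int → Int) (m : Nat) (a : Int)
    (h : m ≤ cs.length) :
    (PySem.List.pyRange 0 (m : Int) 1).foldl (fun h j => f h (pvChD cs j)) a
      = (cs.take m).foldl (fun h c => f h (pvV c)) a := by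
  have h0 := pvidxFold cs f m 0 a (by omega)
  simpa using h0

lemma pvPoly_append (a : Int) (l : List Char) (c : Char) :
    pvPoly a (l ++ [c]) = 26 * pvPoly a l + pvV c := by
  simp [pvPoly, List.foldl_append]

lemma pvPoly_shift (l : List Char) : ∀ (a : Int), pvPoly a l = a * 26 ^ l.length + pvPoly 0 l := by
  induction l with
  | nil => intro a; simp [pvPoly]
  | cons c l ih =>
    intro a
    have e1 : pvPoly a (c :: l) = pvPoly (26 * a + pvV c) l := by simp [pvPoly]
    have e2 : pvPoly 0 (c :: l) = pvPoly (pvV c) l := by simp [pvPoly]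
    rw [e1, e2, ih (26 * a + pvV c), ih (pvV c)]
    simp only [List.length_cons, pow_succ]
    ring

lemma pvPoly_cons0 (c : Char) (l : List Char) :
    pvPoly 0 (c :: l) = pvV c * 26 ^ l.length + pvPoly 0 l := by
  have e : pvPoly 0 (c :: l) = pvPoly (pvV c) l := by simp [pvPoly]
  rw [e, pvPoly_shift l (pvV c)]

lemma pvPow_natCast (n : Int) : ∀ (k : Nat), pvPow n ((k : Nat) : Int) = n ^ k := by
  intro k
  induction k with
  | zero => simp [pvPow, PySem.List.pyRange_one_eq_nil]
  | succ k ih =>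
    have h1 : ((k + 1 : Nat) : Int) = (k : Int) + 1 := by push_cast; ring
    unfold pvPow at ih ⊢
    rw [h1, PySem.List.pyRange_one_succ_right (by exact_mod_cast Nat.zero_le k), List.foldl_append]
    simp only [List.foldl_cons, List.foldl_nil]
    rw [ih, pow_succ]

lemma pvWindowRoll (xs : List Char) (K m : Nat) (hm : 1 ≤ m) (h : K + 1 + m ≤ xs.length) :
    pvPoly 0 ((xs.drop (K + 1)).take m)
      = (pvPoly 0 ((xs.drop K).take m) - pvV (xs[K]'(by omega)) * 26 ^ (m - 1)) * 26
          + pvV (xs[K + m]'(by omega)) := by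
  obtain ⟨mm, rfl⟩ : ∃ mm, m = mm + 1 := ⟨m - 1, by omega⟩
  have hmid_len : ((xs.drop (K + 1)).take mm).length = mm := by
    simp [List.length_take, List.length_drop]; omega
  have hK : (xs.drop K).take (mm + 1) = xs[K]'(by omega) :: (xs.drop (K + 1)).take mm := by
    rw [List.drop_eq_getElem_cons (by omega), List.take_succ_cons]
  have hK1 : (xs.drop (K + 1)).take (mm + 1)
      = (xs.drop (K + 1)).take mm ++ [xs[K + (mm + 1)]'(by omega)] := by
    rw [List.take_add_one]
    congr
    rw [List.getElem?_drop]
    rw [List.getElem?_eq_getElem (show K + 1 + mm < xs.length by omega)]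
    simp only [Option.toList_some]
    congr 2
    omega
  rw [hK1, pvPoly_append, hK, pvPoly_cons0, hmid_len]
  simp only [Nat.add_sub_cancel]
  ring

lemma pvMainLoop {q : Int} (hq : q ≠ 0) (xs : List Char) (m : Nat) (hm : 1 ≤ m) (pv : Int) :
    ∀ (K : Nat), K + m ≤ xs.length → ∀ (acc0 : List Int),
      (PySem.List.pyRange 1 ((K : Int) + 1) 1).foldl
        (fun (s : List Int × Int) k =>
          (if PySem.Int.mod (PySem.Int.mod ((s.2 - PySem.Int.mod (PySem.Int.mod (pvChD xs (k - 1)) q * PySem.Int.mod (pvPow 26 ((m : Int) - 1)) q) q) * PySem.Int.mod 26 q) q + PySem.Int.mod (pvChD xs (k + (m : Int) - 1)) q) q = pv then s.1 ++ [k] else s.1,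
           PySem.Int.mod (PySem.Int.mod ((s.2 - PySem.Int.mod (PySem.Int.mod (pvChD xs (k - 1)) q * PySem.Int.mod (pvPow 26 ((m : Int) - 1)) q) q) * PySem.Int.mod 26 q) q + PySem.Int.mod (pvChD xs (k + (m : Int) - 1)) q) q))
        (acc0, PySem.Int.mod (pvPoly 0 (xs.take m)) q)
      = ((PySem.List.pyRange 1 ((K : Int) + 1) 1).foldl
          (fun acc k => if PySem.Int.mod (pvPoly 0 ((xs.drop k.toNat).take m)) q = pv then acc ++ [k] else acc) acc0,
         PySem.Int.mod (pvPoly 0 ((xs.drop K).take m)) q) := by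
  intro K
  induction K with
  | zero =>
    intro h acc0
    simp [PySem.List.pyRange_one_eq_nil]
  | succ K ih =>
    intro h acc0
    have e1 : ((K + 1 : Nat) : Int) + 1 = ((K : Int) + 1) + 1 := by push_cast; ring
    rw [e1, PySem.List.pyRange_one_succ_right (by omega), List.foldl_append, List.foldl_append,
      ih (by omega) acc0]
    simp only [List.foldl_cons, List.foldl_nil]
    have ec1 : pvChD xs ((K : Int) + 1 - 1) = pvV (xs[K]'(by omega)) := by
      have e : ((K : Int) + 1 - 1) = ((K : Nat) : Int) := by ring
      rw [e]
      unfold pvChD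
      rw [PySem.List.pyGet?_natCast]
      simp [List.getElem?_eq_getElem (show K < xs.length by omega)]
    have ec2 : pvChD xs ((K : Int) + 1 + (m : Int) - 1) = pvV (xs[K + m]'(by omega)) := by
      have e : ((K : Int) + 1 + (m : Int) - 1) = ((K + m : Nat) : Int) := by push_cast; ring
      rw [e]
      unfold pvChD
      rw [PySem.List.pyGet?_natCast]
      simp [List.getElem?_eq_getElem (show K + m < xs.length by omega)]
    have ew : pvPow 26 ((m : Int) - 1) = 26 ^ (m - 1) := by
      rw [show ((m : Int) - 1) = ((m - 1 : Nat) : Int) by omega, pvPow_natCast]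
    have hroll := pvWindowRoll xs K m hm (by omega)
    have estep : PySem.Int.mod (PySem.Int.mod ((PySem.Int.mod (pvPoly 0 ((xs.drop K).take m)) q - PySem.Int.mod (PySem.Int.mod (pvChD xs ((K : Int) + 1 - 1)) q * PySem.Int.mod (pvPow 26 ((m : Int) - 1)) q) q) * PySem.Int.mod 26 q) q + PySem.Int.mod (pvChD xs ((K : Int) + 1 + (m : Int) - 1)) q) q
        = PySem.Int.mod (pvPoly 0 ((xs.drop (K + 1)).take m)) q := by
      rw [ec1, ec2, ew, pvstepRoll hq, hroll]
    have etn : ((K : Int) + 1).toNat = K + 1 := by omega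
    simp only [estep, etn]

lemma pvEquivMain (q : Int) (p x : String) (hq : q ≠ 0)
    (hlen : p.toList.length ≤ x.toList.length) (hne : p.toList ≠ []) :
    modPatternMatch q p x = modPatternMatch_alt q p x := by
  simp only [modPatternMatch, modPatternMatch_alt]
  have hm : 1 ≤ p.toList.length := List.length_pos_iff.mpr hne
  rw [PySem.List.foldl_prod_mk
        (f := fun s1 i => PySem.Int.mod (PySem.Int.mod (PySem.Int.mod 26 q * s1) q + PySem.Int.mod (pvChD p.toList i) q) q)
        (g := fun s2 i => PySem.Int.mod (PySem.Int.mod (PySem.Int.mod 26 q * s2) q + PySem.Int.mod (pvChD x.toList i) q) q)]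
  -- A's pattern hash
  have h1 := pvidxFold0 p.toList
      (fun h v => PySem.Int.mod (PySem.Int.mod (PySem.Int.mod 26 q * h) q + PySem.Int.mod v q) q)
      p.toList.length 0 (le_refl _)
  simp only [List.take_length] at h1
  rw [pvfoldA0 hq] at h1
  -- A's first-window hash
  have h2 := pvidxFold0 x.toList
      (fun h v => PySem.Int.mod (PySem.Int.mod (PySem.Int.mod 26 q * h) q + PySem.Int.mod v q) q)
      p.toList.length 0 hlen
  rw [pvfoldA0 hq] at h2
  simp only [] at h1 h2
  rw [h1, h2]
  -- B's pattern hash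
  rw [pvfoldB0 hq]
  -- range bound as a successor
  have hT : ((x.toList.length : Int) - (p.toList.length : Int) + 1)
      = ((x.toList.length - p.toList.length : Nat) : Int) + 1 := by omega
  rw [hT]
  -- split B's range at its head k = 0
  rw [PySem.List.pyRange_one_cons (by omega : (0:Int) < ((x.toList.length - p.toList.length : Nat) : Int) + 1)]
  rw [List.foldl_cons]
  -- B's window hash at k = 0
  have h0 : (PySem.List.pyRange 0 (p.toList.length : Int) 1).foldl
      (fun h j => PySem.Int.mod (26 * h + pvChD x.toList ((0:Int) + j)) q) 0
      = PySem.Int.mod (pvPoly 0 (x.toList.take p.toList.length)) q := by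
    simp only [zero_add]
    have := pvidxFold0 x.toList (fun h v => PySem.Int.mod (26 * h + v) q) p.toList.length 0 hlen
    simp only [] at this
    rw [this, pvfoldB0 hq]
  simp only [zero_add] at h0 ⊢
  rw [h0]
  -- A's main rolling loop
  have hmain := pvMainLoop hq x.toList p.toList.length hm (PySem.Int.mod (pvPoly 0 p.toList) q)
      (x.toList.length - p.toList.length) (by omega)
      (if PySem.Int.mod (pvPoly 0 (x.toList.take p.toList.length)) q = PySem.Int.mod (pvPoly 0 p.toList) q
        then [] ++ [(0:Int)] else [])
  rw [hmain]
  -- B's remaining windows agree with the canonical form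
  have hcongr : ∀ k ∈ PySem.List.pyRange 1 (((x.toList.length - p.toList.length : Nat) : Int) + 1) 1,
      ∀ acc : List Int,
      (if (PySem.List.pyRange 0 (p.toList.length : Int) 1).foldl
          (fun h j => PySem.Int.mod (26 * h + pvChD x.toList (k + j)) q) 0
         = PySem.Int.mod (pvPoly 0 p.toList) q then acc ++ [k] else acc)
      = (if PySem.Int.mod (pvPoly 0 ((x.toList.drop k.toNat).take p.toList.length)) q
         = PySem.Int.mod (pvPoly 0 p.toList) q then acc ++ [k] else acc) := by
    intro k hk acc
    rw [PySem.List.mem_pyRange_one] at hk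
    have hk0 : k = ((k.toNat : Nat) : Int) := by omega
    have hwin : (PySem.List.pyRange 0 (p.toList.length : Int) 1).foldl
        (fun h j => PySem.Int.mod (26 * h + pvChD x.toList (k + j)) q) 0
        = PySem.Int.mod (pvPoly 0 ((x.toList.drop k.toNat).take p.toList.length)) q := by
      rw [hk0]
      have := pvidxFold x.toList (fun h v => PySem.Int.mod (26 * h + v) q)
        p.toList.length k.toNat 0 (by omega)
      simp only [] at this
      rw [this, pvfoldB0 hq]
      simp only [Int.toNat_natCast]
    rw [hwin]
  refine Eq.trans (by rfl : _ = List.foldl _ _ _) ?_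
  exact ((PySem.List.foldl_congr_mem' (h := fun k hk acc => hcongr k hk acc)) _).symm

lemma pvmod_unit {q : Int} (hq : q = 1 ∨ q = -1) (a : Int) : PySem.Int.mod a q = 0 := by
  rcases hq with rfl | rfl
  · have b1 := PySem.Int.mod_nonneg (a := a) (b := 1) (by norm_num)
    have b2 := PySem.Int.mod_lt (a := a) (b := 1) (by norm_num)
    omega
  · have b1 := PySem.Int.mod_neg_bounds (a := a) (b := -1) (by norm_num)
    omega

lemma pvEquivUnit (q : Int) (x : String) (hq : q = 1 ∨ q = -1) :
    modPatternMatch q "" x = modPatternMatch_alt q "" x := by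
  have h00 : PySem.List.pyRange 0 0 1 = [] := by decide
  simp only [modPatternMatch, modPatternMatch_alt, String.toList_empty, List.length_nil,
    Nat.cast_zero, sub_zero, h00, List.foldl_nil, pvmod_unit hq, List.nil_append, eq_self_iff_true, if_true]
  rw [PySem.List.foldl_prod_mk (f := fun (acc : List Int) (k : Int) => acc ++ [k])
        (g := fun (_ : Int) (_ : Int) => (0 : Int))]
  simp only []
  rw [PySem.List.foldl_append_singleton_eq_self, PySem.List.foldl_append_singleton_eq_self]
  rw [PySem.List.pyRange_one_cons (by omega : (0:Int) < (x.toList.length : Int) + 1)]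
  norm_num

lemma pvEquivEmpty (q : Int) : modPatternMatch q "" "" = modPatternMatch_alt q "" "" := by
  norm_num [modPatternMatch, modPatternMatch_alt, PySem.List.pyRange_one_eq_nil,
    PySem.List.pyRange_one_singleton]
  decide

-- ===== VERDICT (by name: the statement is the Claim_ definition above) =====
theorem modPatternMatch_spec : Claim_unchanged_modPatternMatch := by
  intro q p x _ hpre hnD
  have hq : q ≠ 0 := hpre.1
  have hlen : p.toList.length ≤ x.toList.length := hpre.2
  by_cases hp : p.toList = []
  · have hpe : p = "" := String.toList_eq_nil_iff.mp hp
    subst hpe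
    by_cases hx : x = ""
    · subst hx
      exact pvEquivEmpty q
    · have hq1 : q = 1 ∨ q = -1 := by
        by_contra hcon
        push Not at hcon
        exact hnD ⟨rfl, hx, hcon.1, hcon.2⟩
      exact pvEquivUnit q x hq1
  · exact pvEquivMain q p x hq hlen hp
theorem modPatternMatch_changed : Claim_changed_modPatternMatch := by
  unfold Claim_changed_modPatternMatch; decide
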